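-- pv_equiv track=rewrite | github.com/prowler-cloud/prowler | prowler/lib/check/managers.py | create_check_service_dict
-- ===== SOURCE A (Python) =====
-- def create_check_service_dict(checks_to_execute):
--     output = {}
--     for check_name in checks_to_execute:
--         service = check_name.split("_")[0]
--         if service not in output.keys():
--             output[service] = []
--         output[service].append(check_name)
--     return output
-- ===== SOURCE B (Python) =====
-- def create_check_service_dict(checks_to_execute):
--     # Staged nested-scan grouping: distinct service keys in first-occurrence
--     # order, then one filtering pass over the whole list per service.
--     keys = dict.fromkeys(c.split("_")[0] for c in checks_to_execute)
--     return {
--         s: [c for c in checks_to_execute if c.split("_")[0] == s]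
--         for s in keys
--     }
-- ===== Notes on version B (the rewrite author's own statement) =====
-- stated objective: alternative
-- what changed: Replaces A's single-pass dict accumulation (membership test, conditional group creation, append) by a staged nested-scan build: compute the distinct service keys in first-occurrence order with dict.fromkeys, then produce each group by filtering the whole input list per key in a dict comprehension.
import Mathlib
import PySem

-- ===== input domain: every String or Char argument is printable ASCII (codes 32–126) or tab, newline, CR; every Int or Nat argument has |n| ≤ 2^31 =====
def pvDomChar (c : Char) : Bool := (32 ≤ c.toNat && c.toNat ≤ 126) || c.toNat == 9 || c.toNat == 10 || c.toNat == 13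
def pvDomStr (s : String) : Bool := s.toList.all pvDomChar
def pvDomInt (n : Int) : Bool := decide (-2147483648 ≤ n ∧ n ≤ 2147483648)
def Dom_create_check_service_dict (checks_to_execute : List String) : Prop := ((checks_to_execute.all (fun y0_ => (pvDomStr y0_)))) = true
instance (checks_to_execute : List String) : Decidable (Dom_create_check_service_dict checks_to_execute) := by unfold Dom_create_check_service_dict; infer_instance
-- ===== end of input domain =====

-- B replaces A's single-pass dict accumulation by a staged nested-scan build (distinct keys
-- first, then one filtering pass per key); return values proved equal.

-- check_name.split("_")[0]: split with the nonempty separator "_" never returns none or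
-- an empty list, so the [0] index never raises; the getD/pyGetD defaults are never taken (exact).
def pvKey (check_name : String) : String :=
  PySem.List.pyGetD ((PySem.Str.split? check_name "_").getD []) 0 ""

-- ===== PORT A =====
-- literal transliteration of A's loop: dict accumulator, membership test, insert [], append
def create_check_service_dict (checks_to_execute : List String) : List (String × List String) :=
  (checks_to_execute.foldl
    (fun (output : PySem.Dict String (List String)) check_name =>
      let service := pvKey check_name
      let output := if output.contains service then output else output.insert service []
      output.modify service [] (fun xs => xs ++ [check_name]))
    PySem.Dict.empty).items

-- ===== PORT B =====
-- transliteration of Source B: dict.fromkeys over the mapped keys is PySem.List.dedup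
-- (first occurrences, in order); then the dict comprehension with a filtering
-- list comprehension per key (its keys are already distinct, so insertion order
-- of the comprehension is exactly this map).
def create_check_service_dict_alt (checks_to_execute : List String) : List (String × List String) :=
  let keys := PySem.List.dedup (checks_to_execute.map pvKey)
  keys.map (fun s => (s, checks_to_execute.filter (fun c => pvKey c == s)))

-- ===== PRECONDITION & SPEC =====
def Spec_create_check_service_dict (checks_to_execute : List String) (out : List (String × List String)) : Prop := out = create_check_service_dict_alt checks_to_execute
instance (checks_to_execute : List String) (out : List (String × List String)) : Decidable (Spec_create_check_service_dict checks_to_execute out) := by unfold Spec_create_check_service_dict; infer_instance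

-- ===== CLAIM (what is proved, stated in full; the proofs are below) =====
def Claim_equal_create_check_service_dict : Prop := ∀ (checks_to_execute : List String), Dom_create_check_service_dict checks_to_execute → Spec_create_check_service_dict checks_to_execute (create_check_service_dict checks_to_execute)

-- ===== LEMMAS AND PROOFS =====

-- A's "if absent then insert []" followed by append is one modify-with-default step
theorem pv_step_eq (d : PySem.Dict String (List String)) (k c : String) :
    (if d.contains k then d else d.insert k []).modify k [] (fun xs => xs ++ [c])
      = d.modify k [] (fun xs => xs ++ [c]) := by
  cases h : d.contains k with
  | true => simp
  | false =>
    simp [PySem.Dict.modify, PySem.Dict.getD_insert_self,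
      PySem.Dict.insert_insert_self, PySem.Dict.getD_of_not_contains, h]

theorem pv_A_eq (checks : List String) :
    create_check_service_dict checks = create_check_service_dict_alt checks := by
  unfold create_check_service_dict create_check_service_dict_alt
  have hfold : (checks.foldl
      (fun (output : PySem.Dict String (List String)) check_name =>
        let service := pvKey check_name
        let output := if output.contains service then output else output.insert service []
        output.modify service [] (fun xs => xs ++ [check_name]))
      PySem.Dict.empty)
      = (checks.map (fun c => (pvKey c, c))).foldl
          (fun d p => d.modify p.1 [] (fun xs => xs ++ [p.2])) PySem.Dict.empty := by
    rw [List.foldl_map]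
    apply List.foldl_ext
    intro d c _
    exact pv_step_eq d (pvKey c) c
  rw [hfold]
  have hnd : ((checks.map (fun c => (pvKey c, c))).foldl
      (fun d p => d.modify p.1 [] (fun xs => xs ++ [p.2])) PySem.Dict.empty).keys.Nodup :=
    PySem.Dict.nodup_keys_foldl_modify_key _ Prod.fst [] (fun _ p xs => xs ++ [p.2]) _
      (by simp [PySem.Dict.keys_empty])
  rw [PySem.Dict.items_eq_map_keys _ hnd []]
  have hkeys : ((checks.map (fun c => (pvKey c, c))).foldl
      (fun d p => d.modify p.1 [] (fun xs => xs ++ [p.2])) PySem.Dict.empty).keys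
      = PySem.List.dedup (checks.map pvKey) := by
    rw [PySem.Dict.keys_foldl_modify_key]
    simp [PySem.Set.update_nil_left, List.map_map, Function.comp_def]
  rw [hkeys]
  apply List.map_congr_left
  intro s _
  rw [PySem.Dict.getD_foldl_modify_append]
  simp [List.filter_map, Function.comp_def, List.map_map]

-- ===== VERDICT (by name: the statement is the Claim_ definition above) =====
theorem create_check_service_dict_spec : Claim_equal_create_check_service_dict := by
  intro checks _
  exact pv_A_eq checks
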